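-- pv_equiv track=rewrite | github.com/skyqnaqna/algorithm_study | programmers/BruteForce/모의고사.py | solution
-- ===== SOURCE A (Python) =====
-- def solution(answers):
--     answer = []
--     a = [1, 2, 3, 4, 5]
--     b = [2, 1, 2, 3, 2, 4, 2, 5]
--     c = [3, 3, 1, 1, 2, 2, 4, 4, 5, 5]
--     score = [0] * 3
--
--     for i in range(len(answers)):
--         if a[i%len(a)] == answers[i]: score[0] += 1
--         if b[i%len(b)] == answers[i]: score[1] += 1
--         if c[i%len(c)] == answers[i]: score[2] += 1
--
--     maxScore = max(score)
--
--     for i in range(3):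
--         if score[i] == maxScore: answer.append(i+1)
--
--     return answer
-- ===== SOURCE B (Python) =====
-- def solution(answers):
--     # Histogram algorithm: bucket the answer sheet once by (position mod 40, value)
--     # (40 = lcm of the three pattern periods 5, 8, 10), then each student's score
--     # is a 40-term table sum over the histogram -- no per-element pattern comparison.
--     patterns = [[1, 2, 3, 4, 5],
--                 [2, 1, 2, 3, 2, 4, 2, 5],
--                 [3, 3, 1, 1, 2, 2, 4, 4, 5, 5]]
--     hist = {}
--     for i, ans in enumerate(answers):
--         key = (i % 40, ans)
--         hist[key] = hist.get(key, 0) + 1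
--     scores = [sum(hist.get((r, p[r % len(p)]), 0) for r in range(40)) for p in patterns]
--     best = max(scores)
--     return [k + 1 for k, s in enumerate(scores) if s == best]
-- ===== Notes on version B (the rewrite author's own statement) =====
-- stated objective: alternative
-- what changed: Replaces A's per-element comparison against the three cyclic patterns by a histogram algorithm: one pass buckets answers by (index mod 40, value) into a dict (40 = lcm of the pattern periods), then each score is a fixed 40-term table-lookup sum over the histogram, winners picked by enumerate/filter.
import Mathlib
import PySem

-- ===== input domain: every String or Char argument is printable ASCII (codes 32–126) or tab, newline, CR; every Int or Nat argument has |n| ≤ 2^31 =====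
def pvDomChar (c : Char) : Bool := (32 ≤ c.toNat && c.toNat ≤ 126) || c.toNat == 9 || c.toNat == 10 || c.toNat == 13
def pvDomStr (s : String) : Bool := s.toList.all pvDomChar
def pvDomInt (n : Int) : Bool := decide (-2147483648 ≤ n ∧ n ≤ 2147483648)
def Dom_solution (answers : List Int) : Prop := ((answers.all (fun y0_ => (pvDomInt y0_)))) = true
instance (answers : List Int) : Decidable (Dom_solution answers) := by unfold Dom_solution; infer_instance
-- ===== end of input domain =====

-- B replaces A's per-element three-pattern comparison by a (index mod 40, value) histogram
-- plus fixed 40-term table sums per pattern (alternative algorithm, same O(n) cost).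

-- ===== PORT A =====
def solution (answers : List Int) : List Int :=
  let a : List Int := [1, 2, 3, 4, 5]
  let b : List Int := [2, 1, 2, 3, 2, 4, 2, 5]
  let c : List Int := [3, 3, 1, 1, 2, 2, 4, 4, 5, 5]
  let score : Int × Int × Int :=
    (PySem.List.pyRange 0 answers.length 1).foldl
      (fun (s : Int × Int × Int) i =>
        (if PySem.List.pyGetD a (PySem.Int.mod i 5) 0 == PySem.List.pyGetD answers i 0 then s.1 + 1 else s.1,
         if PySem.List.pyGetD b (PySem.Int.mod i 8) 0 == PySem.List.pyGetD answers i 0 then s.2.1 + 1 else s.2.1,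
         if PySem.List.pyGetD c (PySem.Int.mod i 10) 0 == PySem.List.pyGetD answers i 0 then s.2.2 + 1 else s.2.2))
      (0, 0, 0)
  let scoreL : List Int := [score.1, score.2.1, score.2.2]
  let maxScore : Int := (PySem.List.max? scoreL id).getD 0
  (PySem.List.pyRange 0 3 1).foldl
    (fun ans i => if PySem.List.pyGetD scoreL i 0 == maxScore then ans ++ [i + 1] else ans) []

-- ===== PORT B =====
-- hist[key] = hist.get(key, 0) + 1 over enumerate(answers), key = (i % 40, ans)
def histB (answers : List Int) : PySem.Dict (Int × Int) Int :=
  (PySem.List.enumerate answers 0).foldl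
    (fun d p => d.insert (PySem.Int.mod p.1 40, p.2) (d.getD (PySem.Int.mod p.1 40, p.2) 0 + 1))
    PySem.Dict.empty

-- sum(hist.get((r, p[r % len(p)]), 0) for r in range(40))
def patScoreB (hist : PySem.Dict (Int × Int) Int) (pat : List Int) : Int :=
  ((PySem.List.pyRange 0 40 1).map
    (fun r => hist.getD (r, PySem.List.pyGetD pat (PySem.Int.mod r (pat.length : Int)) 0) 0)).sum

def solution_alt (answers : List Int) : List Int :=
  let patterns : List (List Int) :=
    [[1, 2, 3, 4, 5], [2, 1, 2, 3, 2, 4, 2, 5], [3, 3, 1, 1, 2, 2, 4, 4, 5, 5]]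
  let hist := histB answers
  let scores : List Int := patterns.map (patScoreB hist)
  let best : Int := (PySem.List.max? scores id).getD 0
  ((PySem.List.enumerate scores 0).filter (fun p => p.2 == best)).map (fun p => p.1 + 1)

-- ===== PRECONDITION & SPEC =====
def Spec_solution (answers : List Int) (out : List Int) : Prop := out = solution_alt answers
instance (answers : List Int) (out : List Int) : Decidable (Spec_solution answers out) := by unfold Spec_solution; infer_instance

-- ===== CLAIM (what is proved, stated in full; the proofs are below) =====
def Claim_equal_solution : Prop := ∀ (answers : List Int), Dom_solution answers → Spec_solution answers (solution answers)

-- ===== LEMMAS AND PROOFS =====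

-- indicator sum over a Nodup list: exactly the occurrence of t contributes
theorem sum_map_ite_single {l : List Int} (hnd : l.Nodup) (t : Int) (c : Int) :
    (l.map (fun r => if r = t then c else 0)).sum = if t ∈ l then c else 0 := by
  induction l with
  | nil => simp
  | cons x xs ih =>
    simp only [List.map_cons, List.sum_cons, List.nodup_cons] at *
    rcases hnd with ⟨hx, hnd⟩
    rw [ih hnd]
    by_cases hxt : x = t
    · subst hxt; simp [hx]
    · simp [hxt, Ne.symm hxt, List.mem_cons]

-- histogram lookup is a count over the keyed list
theorem histB_getD (answers : List Int) (k : Int × Int) :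
    (histB answers).getD k 0 =
      (((PySem.List.enumerate answers 0).map (fun p => (PySem.Int.mod p.1 40, p.2))).count k : Int) := by
  have h : histB answers =
      ((PySem.List.enumerate answers 0).map (fun p => (PySem.Int.mod p.1 40, p.2))).foldl
        (fun (d : PySem.Dict (Int × Int) Int) x => d.insert x (d.getD x 0 + 1)) PySem.Dict.empty :=
    (List.foldl_map (f := fun p : Int × Int => (PySem.Int.mod p.1 40, p.2))
      (g := fun (d : PySem.Dict (Int × Int) Int) x => d.insert x (d.getD x 0 + 1))
      (l := PySem.List.enumerate answers 0) (init := PySem.Dict.empty)).symm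
  rw [h, PySem.Dict.getD_foldl_insert_add_one]
  simp

-- the 40-term table sum over a histogram of keys with first component in [0,40)
theorem table_sum_eq_countP (K : List (Int × Int)) (g : Int → Int)
    (hK : ∀ q ∈ K, 0 ≤ q.1 ∧ q.1 < 40) :
    ((PySem.List.pyRange 0 40 1).map (fun r => (K.count (r, g r) : Int))).sum =
      (K.countP (fun q => q.2 == g q.1) : Int) := by
  induction K with
  | nil => simp
  | cons q K ih =>
    rcases q with ⟨q1, q2⟩
    obtain ⟨hq0, hq40⟩ := hK (q1, q2) List.mem_cons_self
    have hrest : ∀ p ∈ K, 0 ≤ p.1 ∧ p.1 < 40 := fun p hp => hK p (List.mem_cons_of_mem _ hp)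
    have hmapeq : ((PySem.List.pyRange 0 40 1).map (fun r => (List.count (r, g r) ((q1, q2) :: K) : Int))) =
        ((PySem.List.pyRange 0 40 1).map (fun r =>
          (if (r, g r) = (q1, q2) then (1:Int) else 0) + (List.count (r, g r) K : Int))) := by
      refine List.map_congr_left (fun r _ => ?_)
      rw [List.count_cons]
      by_cases h : (r, g r) = (q1, q2)
      · simp [h]; ring
      · have hbf : ((q1, q2) == (r, g r)) = false := by
          simp only [beq_eq_false_iff_ne, ne_eq]
          exact fun he => h he.symm
        simp [hbf, h]
    rw [hmapeq, PySem.List.sum_map_add_int, ih hrest, List.countP_cons]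
    by_cases hv : g q1 = q2
    · have hind : ((PySem.List.pyRange 0 40 1).map (fun r => if (r, g r) = (q1, q2) then (1:Int) else 0)) =
          ((PySem.List.pyRange 0 40 1).map (fun r => if r = q1 then (1:Int) else 0)) := by
        refine List.map_congr_left (fun r _ => ?_)
        by_cases hrq : r = q1
        · subst hrq; simp [hv]
        · simp [Prod.ext_iff, hrq]
      rw [hind, sum_map_ite_single (PySem.List.nodup_pyRange_one 0 40) q1 1]
      have hmem : q1 ∈ PySem.List.pyRange 0 40 1 := PySem.List.mem_pyRange_one.mpr ⟨hq0, hq40⟩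
      have hbeq : (q2 == g q1) = true := by simp [hv.symm]
      simp [hmem, hbeq]
      ring
    · have hind : ((PySem.List.pyRange 0 40 1).map (fun r => if (r, g r) = (q1, q2) then (1:Int) else 0)) =
          ((PySem.List.pyRange 0 40 1).map (fun _ => (0:Int))) := by
        refine List.map_congr_left (fun r _ => ?_)
        have hne : (r, g r) ≠ (q1, q2) := by
          intro h
          rw [Prod.mk.injEq] at h
          obtain ⟨h1, h2⟩ := h
          subst h1
          exact hv h2
        simp [hne]
      have hbeq : (q2 == g q1) = false := by
        simp only [beq_eq_false_iff_ne, ne_eq]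
        exact fun h => hv h.symm
      rw [hind]
      simp [hbeq]

-- B's per-pattern score equals the index-wise match count, for a pattern whose length divides 40
theorem patScoreB_eq_countP (answers pat : List Int) (hL : 0 < pat.length) (hdvd : (pat.length : Int) ∣ 40) :
    patScoreB (histB answers) pat =
      ((PySem.List.pyRange 0 answers.length 1).countP
        (fun i => PySem.List.pyGetD pat (PySem.Int.mod i (pat.length : Int)) 0 == PySem.List.pyGetD answers i 0) : Int) := by
  unfold patScoreB
  have h1 : ((PySem.List.pyRange 0 40 1).map
      (fun r => (histB answers).getD (r, PySem.List.pyGetD pat (PySem.Int.mod r (pat.length : Int)) 0) 0)) =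
      ((PySem.List.pyRange 0 40 1).map
        (fun r => (((PySem.List.enumerate answers 0).map (fun p => (PySem.Int.mod p.1 40, p.2))).count
          (r, PySem.List.pyGetD pat (PySem.Int.mod r (pat.length : Int)) 0) : Int))) :=
    List.map_congr_left (fun r _ => histB_getD answers _)
  rw [h1]
  have hK : ∀ q ∈ (PySem.List.enumerate answers 0).map (fun p => (PySem.Int.mod p.1 40, p.2)),
      0 ≤ q.1 ∧ q.1 < 40 := by
    intro q hqm
    rw [List.mem_map] at hqm
    rcases hqm with ⟨p, _, rfl⟩
    exact ⟨PySem.Int.mod_nonneg _ (by norm_num), PySem.Int.mod_lt _ (by norm_num)⟩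
  rw [table_sum_eq_countP _ _ hK]
  rw [List.countP_map, PySem.List.enumerate_eq_map_pyRange (d := 0), List.countP_map]
  congr 1
  apply List.countP_congr
  intro i him
  have hLi : (0:Int) < (pat.length : Int) := by exact_mod_cast hL
  have h40 : PySem.Int.mod (PySem.Int.mod i 40) (pat.length : Int) = PySem.Int.mod i (pat.length : Int) := by
    rw [PySem.Int.mod_eq_emod_of_pos (by norm_num : (0:Int) < 40),
        PySem.Int.mod_eq_emod_of_pos hLi, PySem.Int.mod_eq_emod_of_pos hLi]
    exact Int.emod_emod_of_dvd i hdvd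
  simp only [Function.comp, h40]
  constructor <;> intro h <;> simpa [BEq.comm] using h

-- A's interleaved three-counter loop computed componentwise
theorem Aloop_eq (answers : List Int) (pa pb pc : List Int) (la lb lc : Int) :
    (PySem.List.pyRange 0 answers.length 1).foldl
      (fun (s : Int × Int × Int) i =>
        (if PySem.List.pyGetD pa (PySem.Int.mod i la) 0 == PySem.List.pyGetD answers i 0 then s.1 + 1 else s.1,
         if PySem.List.pyGetD pb (PySem.Int.mod i lb) 0 == PySem.List.pyGetD answers i 0 then s.2.1 + 1 else s.2.1,
         if PySem.List.pyGetD pc (PySem.Int.mod i lc) 0 == PySem.List.pyGetD answers i 0 then s.2.2 + 1 else s.2.2))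
      (0, 0, 0) =
    (((PySem.List.pyRange 0 answers.length 1).countP
        (fun i => PySem.List.pyGetD pa (PySem.Int.mod i la) 0 == PySem.List.pyGetD answers i 0) : Int),
     ((PySem.List.pyRange 0 answers.length 1).countP
        (fun i => PySem.List.pyGetD pb (PySem.Int.mod i lb) 0 == PySem.List.pyGetD answers i 0) : Int),
     ((PySem.List.pyRange 0 answers.length 1).countP
        (fun i => PySem.List.pyGetD pc (PySem.Int.mod i lc) 0 == PySem.List.pyGetD answers i 0) : Int)) := by
  rw [PySem.List.foldl_prod_mk
      (f := fun (acc : Int) i => if PySem.List.pyGetD pa (PySem.Int.mod i la) 0 == PySem.List.pyGetD answers i 0 then acc + 1 else acc)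
      (g := fun (t : Int × Int) i =>
        (if PySem.List.pyGetD pb (PySem.Int.mod i lb) 0 == PySem.List.pyGetD answers i 0 then t.1 + 1 else t.1,
         if PySem.List.pyGetD pc (PySem.Int.mod i lc) 0 == PySem.List.pyGetD answers i 0 then t.2 + 1 else t.2)),
    PySem.List.foldl_prod_mk
      (f := fun (acc : Int) i => if PySem.List.pyGetD pb (PySem.Int.mod i lb) 0 == PySem.List.pyGetD answers i 0 then acc + 1 else acc)
      (g := fun (acc : Int) i => if PySem.List.pyGetD pc (PySem.Int.mod i lc) 0 == PySem.List.pyGetD answers i 0 then acc + 1 else acc)]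
  refine Prod.ext ?_ (Prod.ext ?_ ?_) <;>
    · simp only [PySem.List.foldl_ite_add_one, zero_add]
      norm_cast
      exact List.countP_congr (fun x _ => by simp)

-- selection of the winners from three abstract scores: A's append loop equals B's filter/map
theorem finalSelect_eq (s0 s1 s2 : Int) :
    (PySem.List.pyRange 0 3 1).foldl
      (fun ans i => if PySem.List.pyGetD [s0, s1, s2] i 0 == (PySem.List.max? [s0, s1, s2] id).getD 0 then ans ++ [i + 1] else ans) [] =
    ((PySem.List.enumerate [s0, s1, s2] 0).filter (fun p => p.2 == (PySem.List.max? [s0, s1, s2] id).getD 0)).map (fun p => p.1 + 1) := by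
  have h3 : PySem.List.pyRange 0 3 1 = [0, 1, 2] := by decide
  have e0 : PySem.List.pyGetD [s0, s1, s2] 0 0 = s0 := rfl
  have e1 : PySem.List.pyGetD [s0, s1, s2] 1 0 = s1 := rfl
  have e2 : PySem.List.pyGetD [s0, s1, s2] 2 0 = s2 := rfl
  have he : PySem.List.enumerate [s0, s1, s2] 0 = [(0, s0), (1, s1), (2, s2)] := by
    norm_num [PySem.List.enumerate_cons, PySem.List.enumerate_nil]
  rw [h3, he]
  simp only [List.foldl_cons, List.foldl_nil, e0, e1, e2, List.filter_cons, List.filter_nil]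
  split_ifs <;> rfl

-- ===== VERDICT (by name: the statement is the Claim_ definition above) =====
theorem solution_spec : Claim_equal_solution := by
  intro answers _
  unfold Spec_solution solution solution_alt
  dsimp only
  rw [Aloop_eq]
  simp only [List.map_cons, List.map_nil,
    patScoreB_eq_countP answers [1,2,3,4,5] (by norm_num) (by norm_num),
    patScoreB_eq_countP answers [2,1,2,3,2,4,2,5] (by norm_num) (by norm_num),
    patScoreB_eq_countP answers [3,3,1,1,2,2,4,4,5,5] (by norm_num) (by norm_num)]
  exact finalSelect_eq _ _ _
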